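-- pv_equiv track=rewrite | github.com/egandone/aoc | 2020/day11/day11_2.py | run_iteration
-- ===== SOURCE A (Python) =====
-- import collections
-- import copy
--
-- def get_closet_seat(grid, y, x, dy, dx):
--     _y = y + dy
--     _x = x + dx
--     while _y >= 0 and _y < len(grid) and _x >= 0 and _x < len(grid[_y]):
--         if grid[_y][_x] in ["L", "#"]:
--             return grid[_y][_x]
--         _y += dy
--         _x += dx
--     return "."
--
-- def get_directional_closet_seats(grid, y, x):
--     seat_counter = collections.Counter()
--     for dy in [-1, 0, 1]:
--         for dx in [-1, 0, 1]:
--             if dx != 0 or dy != 0: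
--                 s = get_closet_seat(grid, y, x, dy, dx)
--                 seat_counter.update(s)
--     return seat_counter
--
-- def run_iteration(grid):
--     _grid = copy.deepcopy(grid)
--     updates = 0
--     for y in range(0, len(grid)):
--         for x in range(0, len(grid[y])):
--             seats = get_directional_closet_seats(grid, y, x)
--             if grid[y][x] == "L":
--                 if "#" not in seats:
--                     _grid[y][x] = "#"
--                     updates += 1
--             elif grid[y][x] == "#":
--                 if "#" in seats and seats["#"] >= 5:
--                     _grid[y][x] = "L"
--                     updates += 1
--     return _grid, updates
-- ===== SOURCE B (Python) =====
-- def run_iteration(grid):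
--     # Eight directional sweeps: each sweep computes, for every cell, the nearest
--     # visible seat in one direction in O(1) per cell, so the whole step is O(N*M)
--     # instead of A's per-cell ray walks.
--
--     def merged(row, vis):
--         # what a neighbour looking INTO this row at column i would see
--         return [c if c in ("L", "#") else v for c, v in zip(row, vis)]
--
--     def next_vis(row, prev, dx):
--         # vis for `row` looking toward the previous row (already merged), column offset dx
--         out = []
--         for x in range(len(row)):
--             px = x + dx
--             out.append(prev[px] if 0 <= px < len(prev) else ".")
--         return out
--
--     def sweep(rows, dx):
--         out, prev = [], []
--         for row in rows:
--             v = next_vis(row, prev, dx)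
--             out.append(v)
--             prev = merged(row, v)
--         return out
--
--     def line_vis(row):
--         # vis[i] = nearest seat strictly before position i within the row
--         vis, v = [], "."
--         for c in row:
--             vis.append(v)
--             if c in ("L", "#"):
--                 v = c
--         return vis
--
--     tables = []
--     for dx in (-1, 0, 1):
--         tables.append(sweep(grid, dx))                                   # looking up    (dy = -1)
--         tables.append(list(reversed(sweep(list(reversed(grid)), dx))))   # looking down  (dy = +1)
--     tables.append([line_vis(row) for row in grid])                                        # looking left
--     tables.append([list(reversed(line_vis(list(reversed(row))))) for row in grid])        # looking right
--
--     new_grid, updates = [], 0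
--     for y, row in enumerate(grid):
--         new_row = []
--         for x, c in enumerate(row):
--             k = sum(1 for t in tables if t[y][x] == "#")
--             if c == "L" and k == 0:
--                 new_row.append("#")
--                 updates += 1
--             elif c == "#" and k >= 5:
--                 new_row.append("L")
--                 updates += 1
--             else:
--                 new_row.append(c)
--         new_grid.append(new_row)
--     return new_grid, updates
-- ===== Notes on version B (the rewrite author's own statement) =====
-- stated objective: faster
-- what changed: Replaces A's per-cell ray walk in each of the 8 directions (O(N+M) work per cell) and its Counter bookkeeping by eight whole-grid directional sweeps that propagate the nearest visible seat in O(1) per cell, then assembles the new grid from O(1) table lookups.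
import Mathlib
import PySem

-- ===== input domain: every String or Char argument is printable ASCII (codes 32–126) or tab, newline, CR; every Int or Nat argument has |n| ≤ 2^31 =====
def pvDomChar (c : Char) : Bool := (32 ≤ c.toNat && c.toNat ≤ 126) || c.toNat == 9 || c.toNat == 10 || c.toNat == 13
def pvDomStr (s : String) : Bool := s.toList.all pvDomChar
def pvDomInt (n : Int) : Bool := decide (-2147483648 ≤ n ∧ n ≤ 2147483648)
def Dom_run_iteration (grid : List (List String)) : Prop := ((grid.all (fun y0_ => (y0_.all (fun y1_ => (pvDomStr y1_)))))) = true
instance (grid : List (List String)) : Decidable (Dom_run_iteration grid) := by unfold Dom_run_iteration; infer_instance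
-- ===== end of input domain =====

-- B replaces A's per-cell ray walks (8 directions, O(N+M) each) by eight whole-grid
-- directional sweeps that propagate the nearest visible seat in O(1) per cell (faster:
-- asymptotic, O(N·M) vs O(N·M·(N+M))).  A only mutates its deepcopy, so return values
-- are the whole story.

-- ===== PORT A =====

-- while loop of get_closet_seat; the fuel only makes the recursion structural and is
-- never exhausted on the calls run_iteration makes (dy, dx never both 0).
def pvGcsLoop (grid : List (List String)) (dy dx : Int) : Nat → Int → Int → String
  | 0, _, _ => "."
  | fuel + 1, y, x =>
    if 0 ≤ y ∧ y < (grid.length : Int) then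
      let row := grid.getD y.toNat []
      if 0 ≤ x ∧ x < (row.length : Int) then
        let c := row.getD x.toNat ""
        if c = "L" ∨ c = "#" then c
        else pvGcsLoop grid dy dx fuel (y + dy) (x + dx)
      else "."
    else "."

def get_closet_seat (grid : List (List String)) (y x dy dx : Int) : String :=
  pvGcsLoop grid dy dx (grid.length + ((PySem.List.pyGet? grid y).getD []).length + 2) (y + dy) (x + dx)

-- seat_counter.update(s): for each character of s, counter[ch] += 1
def pvCounterUpdate (d : PySem.Dict Char Int) (s : String) : PySem.Dict Char Int :=
  s.toList.foldl (fun d ch => d.insert ch (d.getD ch 0 + 1)) d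

def get_directional_closet_seats (grid : List (List String)) (y x : Int) : PySem.Dict Char Int :=
  ([-1, 0, 1] : List Int).foldl (fun d dy =>
    ([-1, 0, 1] : List Int).foldl (fun d dx =>
      if dx ≠ 0 ∨ dy ≠ 0 then pvCounterUpdate d (get_closet_seat grid y x dy dx) else d) d)
    PySem.Dict.empty

def run_iteration (grid : List (List String)) : List (List String) × Int :=
  (List.range grid.length).foldl (fun st (y : Nat) =>
    let row := grid.getD y []
    (List.range row.length).foldl (fun st (x : Nat) =>
      let seats := get_directional_closet_seats grid (y : Int) (x : Int)
      let c := row.getD x ""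
      if c = "L" then
        if seats.contains '#' = false then (st.1.modify y (fun r => r.set x "#"), st.2 + 1) else st
      else if c = "#" then
        if seats.contains '#' = true ∧ 5 ≤ seats.getD '#' 0 then (st.1.modify y (fun r => r.set x "L"), st.2 + 1)
        else st
      else st) st) (grid, 0)

-- ===== PORT B =====

def pvSeat (c : String) : Bool := c == "L" || c == "#"

-- merged(row, vis): what a neighbour looking into this row at column i sees
def pvMerged (row vis : List String) : List String :=
  (row.zip vis).map (fun p => if pvSeat p.1 then p.1 else p.2)

-- next_vis(row, prev, dx)
def pvNextVis (row prev : List String) (dx : Int) : List String :=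
  (List.range row.length).map (fun (x : Nat) =>
    if 0 ≤ (x : Int) + dx ∧ (x : Int) + dx < (prev.length : Int) then prev.getD ((x : Int) + dx).toNat "."
    else ".")

-- sweep(rows, dx)
def pvSweep (rows : List (List String)) (dx : Int) : List (List String) :=
  (rows.foldl (fun (acc : List (List String) × List String) row =>
    let v := pvNextVis row acc.2 dx
    (acc.1 ++ [v], pvMerged row v)) ([], [])).1

-- line_vis(row)
def pvLineVis (row : List String) : List String :=
  (row.foldl (fun (acc : List String × String) c =>
    (acc.1 ++ [acc.2], if pvSeat c then c else acc.2)) ([], ".")).1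

def run_iteration_alt (grid : List (List String)) : List (List String) × Int :=
  let tables : List (List (List String)) :=
    [pvSweep grid (-1), (pvSweep grid.reverse (-1)).reverse,
     pvSweep grid 0, (pvSweep grid.reverse 0).reverse,
     pvSweep grid 1, (pvSweep grid.reverse 1).reverse,
     grid.map pvLineVis,
     grid.map (fun row => (pvLineVis row.reverse).reverse)]
  (PySem.List.enumerate grid 0).foldl (fun (st : List (List String) × Int) yrow =>
    let res := (PySem.List.enumerate yrow.2 0).foldl (fun (st2 : List String × Int) xc =>
      let k : Int :=
        (tables.map (fun t => if (t.getD yrow.1.toNat []).getD xc.1.toNat "" = "#" then (1 : Int) else 0)).sum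
      if xc.2 = "L" ∧ k = 0 then (st2.1 ++ ["#"], st2.2 + 1)
      else if xc.2 = "#" ∧ 5 ≤ k then (st2.1 ++ ["L"], st2.2 + 1)
      else (st2.1 ++ [xc.2], st2.2)) ([], st.2)
    (st.1 ++ [res.1], res.2)) ([], 0)

-- ===== PRECONDITION & SPEC =====
def Spec_run_iteration (grid : List (List String)) (out : List (List String) × Int) : Prop := out = run_iteration_alt grid
instance (grid : List (List String)) (out : List (List String) × Int) : Decidable (Spec_run_iteration grid out) := by unfold Spec_run_iteration; infer_instance

-- ===== CLAIM (what is proved, stated in full; the proofs are below) =====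
def Claim_equal_run_iteration : Prop := ∀ (grid : List (List String)), Dom_run_iteration grid → Spec_run_iteration grid (run_iteration grid)


-- ===== LEMMAS AND PROOFS =====

-- ---- the common mathematical description: per-direction visible-seat walks ----

-- walk through successive rows (offset dx per step), starting at column x of the first row
def pvRayWalk (dx : Int) : List (List String) → Int → String
  | [], _ => "."
  | r :: rs, x =>
    if 0 ≤ x ∧ x < (r.length : Int) then
      let c := r.getD x.toNat ""
      if c = "L" ∨ c = "#" then c else pvRayWalk dx rs (x + dx)
    else "."

-- walk within a single row (first seat in the list), default d at the end
def pvHWalkD (d : String) : List String → String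
  | [] => d
  | c :: cs => if c = "L" ∨ c = "#" then c else pvHWalkD d cs

def pvInd (s : String) : Int := if s = "#" then 1 else 0

-- number of directions whose nearest visible seat from (y,x) is "#", in A's direction order
def pvCnt (grid : List (List String)) (y x : Nat) : Int :=
  pvInd (pvRayWalk (-1) ((grid.take y).reverse) ((x : Int) + -1))
  + pvInd (pvRayWalk 0 ((grid.take y).reverse) ((x : Int) + 0))
  + pvInd (pvRayWalk 1 ((grid.take y).reverse) ((x : Int) + 1))
  + pvInd (pvHWalkD "." (((grid.getD y []).take x).reverse))
  + pvInd (pvHWalkD "." ((grid.getD y []).drop (x + 1)))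
  + pvInd (pvRayWalk (-1) (grid.drop (y + 1)) ((x : Int) + -1))
  + pvInd (pvRayWalk 0 (grid.drop (y + 1)) ((x : Int) + 0))
  + pvInd (pvRayWalk 1 (grid.drop (y + 1)) ((x : Int) + 1))

def pvNewCell (c : String) (k : Int) : String :=
  if c = "L" ∧ k = 0 then "#" else if c = "#" ∧ 5 ≤ k then "L" else c

def pvIncr (c : String) (k : Int) : Int :=
  if c = "L" ∧ k = 0 then 1 else if c = "#" ∧ 5 ≤ k then 1 else 0

def pvSpecRow (grid : List (List String)) (y : Nat) : List String :=
  (List.range (grid.getD y []).length).map (fun x => pvNewCell ((grid.getD y []).getD x "") (pvCnt grid y x))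

def pvRowIncr (grid : List (List String)) (y : Nat) : Int :=
  ((List.range (grid.getD y []).length).map (fun x => pvIncr ((grid.getD y []).getD x "") (pvCnt grid y x))).sum

def pvSpec (grid : List (List String)) : List (List String) × Int :=
  ((List.range grid.length).map (pvSpecRow grid), ((List.range grid.length).map (pvRowIncr grid)).sum)

-- ---- A side: the while loop computes the walks ----

lemma pvGcsLoop_up (grid : List (List String)) (dxv : Int) :
    ∀ (k : Nat) (fuel : Nat) (x : Int), k ≤ grid.length → k < fuel →
      pvGcsLoop grid (-1) dxv fuel ((k : Int) - 1) x = pvRayWalk dxv ((grid.take k).reverse) x := by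
  intro k
  induction k with
  | zero =>
    intro fuel x _ hf
    match fuel, hf with
    | fuel + 1, _ => simp [pvGcsLoop, pvRayWalk]
  | succ k ih =>
    intro fuel x hk hf
    match fuel, hf with
    | fuel + 1, hf =>
      have hklt : k < grid.length := by omega
      have hy : (0 : Int) ≤ ((k + 1 : Nat) : Int) - 1 ∧ ((k + 1 : Nat) : Int) - 1 < (grid.length : Int) := by
        push_cast; omega
      have htn : (((k + 1 : Nat) : Int) - 1).toNat = k := by omega
      have htake : (grid.take (k + 1)).reverse = grid[k] :: (grid.take k).reverse := by
        rw [List.take_add_one]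
        simp [List.getElem?_eq_getElem hklt]
      rw [htake]
      simp only [pvGcsLoop, hy, and_self, if_true, htn, pvRayWalk]
      rw [List.getD_eq_getElem grid [] hklt]
      split
      · split
        · rfl
        · have h3 : ((k + 1 : Nat) : Int) - 1 + -1 = (k : Int) - 1 := by push_cast; omega
          rw [h3, ih fuel (x + dxv) (by omega) (by omega)]
      · rfl

lemma pvGcsLoop_down (grid : List (List String)) (dxv : Int) :
    ∀ (fuel : Nat) (k : Nat) (x : Int), grid.length < fuel + k →
      pvGcsLoop grid 1 dxv fuel (k : Int) x = pvRayWalk dxv (grid.drop k) x := by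
  intro fuel
  induction fuel with
  | zero =>
    intro k x hk
    have h1 : grid.drop k = [] := List.drop_eq_nil_of_le (by omega)
    simp [pvGcsLoop, h1, pvRayWalk]
  | succ fuel ih =>
    intro k x hk
    by_cases hlt : k < grid.length
    · have hy : (0 : Int) ≤ (k : Int) ∧ (k : Int) < (grid.length : Int) := by omega
      have hdrop : grid.drop k = grid[k] :: grid.drop (k + 1) := List.drop_eq_getElem_cons hlt
      rw [hdrop]
      simp only [pvGcsLoop, hy, and_self, if_true, Int.toNat_natCast, pvRayWalk]
      rw [List.getD_eq_getElem grid [] hlt]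
      split
      · split
        · rfl
        · have h3 : (k : Int) + 1 = ((k + 1 : Nat) : Int) := by push_cast; ring
          rw [h3, ih (k + 1) (x + dxv) (by omega)]
      · rfl
    · have h1 : grid.drop k = [] := List.drop_eq_nil_of_le (by omega)
      have h2 : ¬ ((0 : Int) ≤ (k : Int) ∧ (k : Int) < (grid.length : Int)) := by omega
      rw [h1]
      simp only [pvGcsLoop]
      rw [if_neg h2]
      rfl

lemma pvGcsLoop_left (grid : List (List String)) (y : Nat) (row : List String)
    (hy : y < grid.length) (hrow : grid.getD y [] = row) :
    ∀ (j : Nat) (fuel : Nat), j ≤ row.length → j < fuel →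
      pvGcsLoop grid 0 (-1) fuel (y : Int) ((j : Int) - 1) = pvHWalkD "." ((row.take j).reverse) := by
  have hyy : (0 : Int) ≤ (y : Int) ∧ (y : Int) < (grid.length : Int) := by omega
  have hrow' : grid.getD (y : Int).toNat [] = row := by simpa using hrow
  intro j
  induction j with
  | zero =>
    intro fuel _ hf
    match fuel, hf with
    | fuel + 1, _ =>
      simp only [pvGcsLoop, hyy, and_self, if_true, hrow']
      have hneg : ¬ ((0 : Int) ≤ ((0 : Nat) : Int) - 1 ∧ ((0 : Nat) : Int) - 1 < (row.length : Int)) := by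
        omega
      rw [if_neg hneg]
      rfl
  | succ j ih =>
    intro fuel hj hf
    match fuel, hf with
    | fuel + 1, hf =>
      have hjlt : j < row.length := by omega
      have hxx : (0 : Int) ≤ ((j + 1 : Nat) : Int) - 1 ∧ ((j + 1 : Nat) : Int) - 1 < (row.length : Int) := by
        push_cast; omega
      have htn : (((j + 1 : Nat) : Int) - 1).toNat = j := by omega
      have htake : (row.take (j + 1)).reverse = row[j] :: (row.take j).reverse := by
        rw [List.take_add_one]
        simp [List.getElem?_eq_getElem hjlt]
      rw [htake]
      simp only [pvGcsLoop, hyy, and_self, if_true, hrow', hxx, htn, pvHWalkD]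
      rw [List.getD_eq_getElem row "" hjlt]
      split
      · rfl
      · have h3 : ((j + 1 : Nat) : Int) - 1 + -1 = (j : Int) - 1 := by push_cast; omega
        have h4 : (y : Int) + 0 = (y : Int) := by ring
        rw [h3, h4, ih fuel (by omega) (by omega)]

lemma pvGcsLoop_right (grid : List (List String)) (y : Nat) (row : List String)
    (hy : y < grid.length) (hrow : grid.getD y [] = row) :
    ∀ (fuel : Nat) (j : Nat), row.length < fuel + j →
      pvGcsLoop grid 0 1 fuel (y : Int) (j : Int) = pvHWalkD "." (row.drop j) := by
  have hyy : (0 : Int) ≤ (y : Int) ∧ (y : Int) < (grid.length : Int) := by omega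
  have hrow' : grid.getD (y : Int).toNat [] = row := by simpa using hrow
  intro fuel
  induction fuel with
  | zero =>
    intro j hj
    have h1 : row.drop j = [] := List.drop_eq_nil_of_le (by omega)
    rw [h1]
    rfl
  | succ fuel ih =>
    intro j hj
    by_cases hlt : j < row.length
    · have hxx : (0 : Int) ≤ (j : Int) ∧ (j : Int) < (row.length : Int) := by omega
      have hdrop : row.drop j = row[j] :: row.drop (j + 1) := List.drop_eq_getElem_cons hlt
      rw [hdrop]
      simp only [pvGcsLoop, Int.toNat_natCast, hrow, pvHWalkD]
      rw [if_pos hyy, if_pos hxx, List.getD_eq_getElem row "" hlt]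
      split
      · rfl
      · have h3 : (j : Int) + 1 = ((j + 1 : Nat) : Int) := by push_cast; ring
        have h4 : (y : Int) + 0 = (y : Int) := by ring
        rw [h3, h4, ih (j + 1) (by omega)]
    · have h1 : row.drop j = [] := List.drop_eq_nil_of_le (by omega)
      have h2 : ¬ ((0 : Int) ≤ (j : Int) ∧ (j : Int) < (row.length : Int)) := by omega
      rw [h1]
      simp only [pvGcsLoop, hyy, and_self, if_true, hrow']
      rw [if_neg h2]
      rfl

-- get_closet_seat at an in-range cell, per direction
lemma pvGcs_fuel (grid : List (List String)) (y : Nat) (hy : y < grid.length) (x dy dx : Int) :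
    get_closet_seat grid (y : Int) x dy dx
      = pvGcsLoop grid dy dx (grid.length + grid[y].length + 2) ((y : Int) + dy) (x + dx) := by
  unfold get_closet_seat
  rw [PySem.List.pyGet?_natCast]
  rw [List.getElem?_eq_getElem hy]
  rfl

lemma pvGcs_up (grid : List (List String)) (y x : Nat) (hy : y < grid.length) (dxv : Int) :
    get_closet_seat grid (y : Int) (x : Int) (-1) dxv
      = pvRayWalk dxv ((grid.take y).reverse) ((x : Int) + dxv) := by
  rw [pvGcs_fuel grid y hy]
  have h1 : (y : Int) + -1 = (y : Int) - 1 := by ring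
  rw [h1, pvGcsLoop_up grid dxv y _ _ (by omega) (by omega)]

lemma pvGcs_down (grid : List (List String)) (y x : Nat) (hy : y < grid.length) (dxv : Int) :
    get_closet_seat grid (y : Int) (x : Int) 1 dxv
      = pvRayWalk dxv (grid.drop (y + 1)) ((x : Int) + dxv) := by
  rw [pvGcs_fuel grid y hy]
  have h1 : (y : Int) + 1 = ((y + 1 : Nat) : Int) := by push_cast; ring
  rw [h1, pvGcsLoop_down grid dxv _ (y + 1) _ (by omega)]

lemma pvGcs_left (grid : List (List String)) (y x : Nat) (row : List String)
    (hy : y < grid.length) (hrow : grid.getD y [] = row) (hx : x < row.length) :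
    get_closet_seat grid (y : Int) (x : Int) 0 (-1)
      = pvHWalkD "." ((row.take x).reverse) := by
  rw [pvGcs_fuel grid y hy]
  have hlen : grid[y].length = row.length := by
    rw [← List.getD_eq_getElem grid [] hy, hrow]
  have h1 : (y : Int) + 0 = (y : Int) := by ring
  have h2 : (x : Int) + -1 = (x : Int) - 1 := by ring
  rw [h1, h2, pvGcsLoop_left grid y row hy hrow x _ (by omega) (by omega)]

lemma pvGcs_right (grid : List (List String)) (y x : Nat) (row : List String)
    (hy : y < grid.length) (hrow : grid.getD y [] = row) (hx : x < row.length) :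
    get_closet_seat grid (y : Int) (x : Int) 0 1
      = pvHWalkD "." (row.drop (x + 1)) := by
  rw [pvGcs_fuel grid y hy]
  have hlen : grid[y].length = row.length := by
    rw [← List.getD_eq_getElem grid [] hy, hrow]
  have h1 : (y : Int) + 0 = (y : Int) := by ring
  have h2 : (x : Int) + 1 = ((x + 1 : Nat) : Int) := by push_cast; ring
  rw [h1, h2, pvGcsLoop_right grid y row hy hrow _ (x + 1) (by omega)]

-- get_closet_seat only ever returns ".", "L" or "#"
lemma pvSeatCase (c r : String) (hr : r = "." ∨ r = "L" ∨ r = "#") :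
    (if c = "L" ∨ c = "#" then c else r) = "." ∨ (if c = "L" ∨ c = "#" then c else r) = "L" ∨
      (if c = "L" ∨ c = "#" then c else r) = "#" := by
  split
  · tauto
  · exact hr

lemma pvGcsLoop_mem (grid : List (List String)) (dy dx : Int) :
    ∀ (fuel : Nat) (y x : Int),
      pvGcsLoop grid dy dx fuel y x = "." ∨ pvGcsLoop grid dy dx fuel y x = "L" ∨
        pvGcsLoop grid dy dx fuel y x = "#" := by
  intro fuel
  induction fuel with
  | zero => intro y x; left; rfl
  | succ fuel ih =>
    intro y x
    simp only [pvGcsLoop]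
    split
    · split
      · exact pvSeatCase _ _ (ih (y + dy) (x + dx))
      · left; rfl
    · left; rfl

lemma pvGcs_mem (grid : List (List String)) (y x dy dx : Int) :
    get_closet_seat grid y x dy dx = "." ∨ get_closet_seat grid y x dy dx = "L" ∨
      get_closet_seat grid y x dy dx = "#" :=
  pvGcsLoop_mem grid dy dx _ _ _

lemma pvInd_nonneg (s : String) : 0 ≤ pvInd s := by
  unfold pvInd; split <;> omega

-- one Counter.update step, tracking the '#' entry
lemma pvCounterUpdate_get (d : PySem.Dict Char Int) (k : Int) (s : String)
    (hs : s = "." ∨ s = "L" ∨ s = "#") (hk : 0 ≤ k)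
    (hd : d.get? '#' = if k = 0 then none else some k) :
    (pvCounterUpdate d s).get? '#'
      = if k + pvInd s = 0 then none else some (k + pvInd s) := by
  rcases hs with h | h | h <;> subst h
  · show (d.insert '.' (d.getD '.' 0 + 1)).get? '#' = _
    rw [PySem.Dict.get?_insert_of_ne d (d.getD '.' 0 + 1) (by decide)]
    simpa [pvInd] using hd
  · show (d.insert 'L' (d.getD 'L' 0 + 1)).get? '#' = _
    rw [PySem.Dict.get?_insert_of_ne d (d.getD 'L' 0 + 1) (by decide)]
    simpa [pvInd] using hd
  · show (d.insert '#' (d.getD '#' 0 + 1)).get? '#' = _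
    rw [PySem.Dict.get?_insert_self]
    have h1 : d.getD '#' 0 = if k = 0 then 0 else k := by
      rw [PySem.Dict.getD_eq_get?_getD, hd]; split <;> rfl
    have h2 : pvInd "#" = 1 := rfl
    rw [h1, h2]
    have h3 : ¬ (k + 1 = 0) := by omega
    rw [if_neg h3]
    split <;> rename_i h4
    · rw [h4]
    · rfl

lemma pvCnt_nonneg (grid : List (List String)) (y x : Nat) : 0 ≤ pvCnt grid y x := by
  unfold pvCnt
  repeat' apply add_nonneg
  all_goals apply pvInd_nonneg

lemma pvCnt_eq (grid : List (List String)) (y x : Nat) (row : List String)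
    (hy : y < grid.length) (hrow : grid.getD y [] = row) (hx : x < row.length) :
    pvCnt grid y x
      = pvInd (get_closet_seat grid (y : Int) (x : Int) (-1) (-1))
        + pvInd (get_closet_seat grid (y : Int) (x : Int) (-1) 0)
        + pvInd (get_closet_seat grid (y : Int) (x : Int) (-1) 1)
        + pvInd (get_closet_seat grid (y : Int) (x : Int) 0 (-1))
        + pvInd (get_closet_seat grid (y : Int) (x : Int) 0 1)
        + pvInd (get_closet_seat grid (y : Int) (x : Int) 1 (-1))
        + pvInd (get_closet_seat grid (y : Int) (x : Int) 1 0)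
        + pvInd (get_closet_seat grid (y : Int) (x : Int) 1 1) := by
  rw [pvGcs_up grid y x hy (-1), pvGcs_up grid y x hy 0, pvGcs_up grid y x hy 1,
      pvGcs_left grid y x row hy hrow hx, pvGcs_right grid y x row hy hrow hx,
      pvGcs_down grid y x hy (-1), pvGcs_down grid y x hy 0, pvGcs_down grid y x hy 1]
  unfold pvCnt
  rw [hrow]

lemma pvGdcs_get (grid : List (List String)) (y x : Nat) (row : List String)
    (hy : y < grid.length) (hrow : grid.getD y [] = row) (hx : x < row.length) :
    (get_directional_closet_seats grid (y : Int) (x : Int)).get? '#'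
      = if pvCnt grid y x = 0 then none else some (pvCnt grid y x) := by
  have hunf : get_directional_closet_seats grid (y : Int) (x : Int)
      = pvCounterUpdate (pvCounterUpdate (pvCounterUpdate (pvCounterUpdate (pvCounterUpdate
          (pvCounterUpdate (pvCounterUpdate (pvCounterUpdate PySem.Dict.empty
          (get_closet_seat grid (y : Int) (x : Int) (-1) (-1)))
          (get_closet_seat grid (y : Int) (x : Int) (-1) 0))
          (get_closet_seat grid (y : Int) (x : Int) (-1) 1))
          (get_closet_seat grid (y : Int) (x : Int) 0 (-1)))
          (get_closet_seat grid (y : Int) (x : Int) 0 1))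
          (get_closet_seat grid (y : Int) (x : Int) 1 (-1)))
          (get_closet_seat grid (y : Int) (x : Int) 1 0))
          (get_closet_seat grid (y : Int) (x : Int) 1 1) := rfl
  have e0 : (PySem.Dict.empty : PySem.Dict Char Int).get? '#' = if (0 : Int) = 0 then none else some 0 := by
    simp [PySem.Dict.get?_empty]
  have e1 := pvCounterUpdate_get _ 0 _ (pvGcs_mem grid (y : Int) (x : Int) (-1) (-1)) (by omega) e0
  have e2 := pvCounterUpdate_get _ _ _ (pvGcs_mem grid (y : Int) (x : Int) (-1) 0)
    (by have := pvInd_nonneg (get_closet_seat grid (y : Int) (x : Int) (-1) (-1)); omega) e1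
  have e3 := pvCounterUpdate_get _ _ _ (pvGcs_mem grid (y : Int) (x : Int) (-1) 1)
    (by have := pvInd_nonneg (get_closet_seat grid (y : Int) (x : Int) (-1) 0)
        have := pvInd_nonneg (get_closet_seat grid (y : Int) (x : Int) (-1) (-1)); omega) e2
  have e4 := pvCounterUpdate_get _ _ _ (pvGcs_mem grid (y : Int) (x : Int) 0 (-1))
    (by have := pvInd_nonneg (get_closet_seat grid (y : Int) (x : Int) (-1) 1)
        have := pvInd_nonneg (get_closet_seat grid (y : Int) (x : Int) (-1) 0)
        have := pvInd_nonneg (get_closet_seat grid (y : Int) (x : Int) (-1) (-1)); omega) e3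
  have e5 := pvCounterUpdate_get _ _ _ (pvGcs_mem grid (y : Int) (x : Int) 0 1)
    (by have := pvInd_nonneg (get_closet_seat grid (y : Int) (x : Int) 0 (-1))
        have := pvInd_nonneg (get_closet_seat grid (y : Int) (x : Int) (-1) 1)
        have := pvInd_nonneg (get_closet_seat grid (y : Int) (x : Int) (-1) 0)
        have := pvInd_nonneg (get_closet_seat grid (y : Int) (x : Int) (-1) (-1)); omega) e4
  have e6 := pvCounterUpdate_get _ _ _ (pvGcs_mem grid (y : Int) (x : Int) 1 (-1))
    (by have := pvInd_nonneg (get_closet_seat grid (y : Int) (x : Int) 0 1)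
        have := pvInd_nonneg (get_closet_seat grid (y : Int) (x : Int) 0 (-1))
        have := pvInd_nonneg (get_closet_seat grid (y : Int) (x : Int) (-1) 1)
        have := pvInd_nonneg (get_closet_seat grid (y : Int) (x : Int) (-1) 0)
        have := pvInd_nonneg (get_closet_seat grid (y : Int) (x : Int) (-1) (-1)); omega) e5
  have e7 := pvCounterUpdate_get _ _ _ (pvGcs_mem grid (y : Int) (x : Int) 1 0)
    (by have := pvInd_nonneg (get_closet_seat grid (y : Int) (x : Int) 1 (-1))
        have := pvInd_nonneg (get_closet_seat grid (y : Int) (x : Int) 0 1)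
        have := pvInd_nonneg (get_closet_seat grid (y : Int) (x : Int) 0 (-1))
        have := pvInd_nonneg (get_closet_seat grid (y : Int) (x : Int) (-1) 1)
        have := pvInd_nonneg (get_closet_seat grid (y : Int) (x : Int) (-1) 0)
        have := pvInd_nonneg (get_closet_seat grid (y : Int) (x : Int) (-1) (-1)); omega) e6
  have e8 := pvCounterUpdate_get _ _ _ (pvGcs_mem grid (y : Int) (x : Int) 1 1)
    (by have := pvInd_nonneg (get_closet_seat grid (y : Int) (x : Int) 1 0)
        have := pvInd_nonneg (get_closet_seat grid (y : Int) (x : Int) 1 (-1))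
        have := pvInd_nonneg (get_closet_seat grid (y : Int) (x : Int) 0 1)
        have := pvInd_nonneg (get_closet_seat grid (y : Int) (x : Int) 0 (-1))
        have := pvInd_nonneg (get_closet_seat grid (y : Int) (x : Int) (-1) 1)
        have := pvInd_nonneg (get_closet_seat grid (y : Int) (x : Int) (-1) 0)
        have := pvInd_nonneg (get_closet_seat grid (y : Int) (x : Int) (-1) (-1)); omega) e7
  rw [hunf, e8]
  have hsum : 0 + pvInd (get_closet_seat grid (y : Int) (x : Int) (-1) (-1))
      + pvInd (get_closet_seat grid (y : Int) (x : Int) (-1) 0)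
      + pvInd (get_closet_seat grid (y : Int) (x : Int) (-1) 1)
      + pvInd (get_closet_seat grid (y : Int) (x : Int) 0 (-1))
      + pvInd (get_closet_seat grid (y : Int) (x : Int) 0 1)
      + pvInd (get_closet_seat grid (y : Int) (x : Int) 1 (-1))
      + pvInd (get_closet_seat grid (y : Int) (x : Int) 1 0)
      + pvInd (get_closet_seat grid (y : Int) (x : Int) 1 1) = pvCnt grid y x := by
    rw [pvCnt_eq grid y x row hy hrow hx]; ring
  rw [hsum]

-- the two branch conditions of A, in terms of the '#' count
lemma pvCond_L (grid : List (List String)) (y x : Nat) (row : List String)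
    (hy : y < grid.length) (hrow : grid.getD y [] = row) (hx : x < row.length) :
    ((get_directional_closet_seats grid (y : Int) (x : Int)).contains '#' = false)
      ↔ pvCnt grid y x = 0 := by
  rw [PySem.Dict.contains_eq_isSome_get?, pvGdcs_get grid y x row hy hrow hx]
  by_cases h : pvCnt grid y x = 0 <;> simp [h]

lemma pvCond_H (grid : List (List String)) (y x : Nat) (row : List String)
    (hy : y < grid.length) (hrow : grid.getD y [] = row) (hx : x < row.length) :
    ((get_directional_closet_seats grid (y : Int) (x : Int)).contains '#' = true
        ∧ 5 ≤ (get_directional_closet_seats grid (y : Int) (x : Int)).getD '#' 0)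
      ↔ 5 ≤ pvCnt grid y x := by
  have hnn := pvCnt_nonneg grid y x
  rw [PySem.Dict.contains_eq_isSome_get?, PySem.Dict.getD_eq_get?_getD,
      pvGdcs_get grid y x row hy hrow hx]
  by_cases h : pvCnt grid y x = 0 <;> simp [h]

-- writing one cell of the copied grid
lemma pvModifyAppend {α : Type} (pre : List α) (a : α) (suf : List α) (f : α → α) :
    (pre ++ a :: suf).modify pre.length f = pre ++ f a :: suf := by
  induction pre with
  | nil => simp [List.modify]
  | cons h t ih => simpa [List.modify] using ih

lemma pvSetAppendLen {α : Type} (l : List α) (a : α) (t : List α) (v : α) :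
    (l ++ a :: t).set l.length v = l ++ v :: t := by
  simp

-- A's inner loop over one row
lemma pvA_inner (grid : List (List String)) (y : Nat) (row : List String)
    (hy : y < grid.length) (hrow : grid.getD y [] = row) :
    ∀ (cnt x : Nat), x + cnt = row.length →
      ∀ (pre : List (List String)), pre.length = y →
      ∀ (rpre : List String), rpre.length = x →
      ∀ (u : Int),
      (List.range' x cnt).foldl
        (fun (st : List (List String) × Int) (x : Nat) =>
          let seats := get_directional_closet_seats grid (y : Int) (x : Int)
          let c := (grid.getD y []).getD x ""
          if c = "L" then
            if seats.contains '#' = false then (st.1.modify y (fun r => r.set x "#"), st.2 + 1) else st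
          else if c = "#" then
            if seats.contains '#' = true ∧ 5 ≤ seats.getD '#' 0 then (st.1.modify y (fun r => r.set x "L"), st.2 + 1)
            else st
          else st)
        (pre ++ (rpre ++ row.drop x) :: grid.drop (y + 1), u)
      = (pre ++ (rpre ++ (List.range' x cnt).map (fun x' => pvNewCell (row.getD x' "") (pvCnt grid y x'))) :: grid.drop (y + 1),
         u + ((List.range' x cnt).map (fun x' => pvIncr (row.getD x' "") (pvCnt grid y x'))).sum) := by
  intro cnt
  induction cnt with
  | zero =>
    intro x hx pre hpre rpre hrpre u
    have hdrop : row.drop x = [] := List.drop_eq_nil_of_le (by omega)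
    simp [hdrop]
  | succ cnt ih =>
    intro x hx pre hpre rpre hrpre u
    have hxlt : x < row.length := by omega
    have hcellD : row.getD x "" = row[x] := List.getD_eq_getElem row "" hxlt
    have hcell : (grid.getD y []).getD x "" = row[x] := by rw [hrow]; exact hcellD
    have hmod : ∀ v : String,
        (pre ++ (rpre ++ row.drop x) :: grid.drop (y + 1)).modify y (fun r => r.set x v)
          = pre ++ ((rpre ++ [v]) ++ row.drop (x + 1)) :: grid.drop (y + 1) := by
      intro v
      rw [← hpre, pvModifyAppend, List.drop_eq_getElem_cons hxlt]
      have hset := pvSetAppendLen rpre row[x] (row.drop (x + 1)) v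
      rw [hrpre] at hset
      rw [hset]
      simp
    have hcur : rpre ++ row.drop x = (rpre ++ [row[x]]) ++ row.drop (x + 1) := by
      rw [List.drop_eq_getElem_cons hxlt]; simp
    rw [List.range'_succ]
    simp only [List.foldl_cons, List.map_cons, List.sum_cons, hcell]
    by_cases hL : row[x] = "L"
    · rw [if_pos hL]
      by_cases h0 : pvCnt grid y x = 0
      · rw [if_pos ((pvCond_L grid y x row hy hrow hxlt).mpr h0)]
        have hval : pvNewCell (row.getD x "") (pvCnt grid y x) = "#" := by
          unfold pvNewCell; rw [hcellD]; simp [hL, h0]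
        have hinc : pvIncr (row.getD x "") (pvCnt grid y x) = 1 := by
          unfold pvIncr; rw [hcellD]; simp [hL, h0]
        rw [hval, hinc, hmod "#", ← add_assoc,
          show rpre ++ "#" :: (List.range' (x + 1) cnt).map (fun x' => pvNewCell (row.getD x' "") (pvCnt grid y x'))
              = (rpre ++ ["#"]) ++ (List.range' (x + 1) cnt).map (fun x' => pvNewCell (row.getD x' "") (pvCnt grid y x'))
            from by simp]
        exact ih (x + 1) (by omega) pre hpre (rpre ++ ["#"]) (by simp [hrpre]) (u + 1)
      · rw [if_neg (fun hc => h0 ((pvCond_L grid y x row hy hrow hxlt).mp hc))]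
        have hval : pvNewCell (row.getD x "") (pvCnt grid y x) = row[x] := by
          unfold pvNewCell; rw [hcellD]; simp [hL, h0]
        have hinc : pvIncr (row.getD x "") (pvCnt grid y x) = 0 := by
          unfold pvIncr; rw [hcellD]; simp [hL, h0]
        rw [hval, hinc, hcur, zero_add,
          show rpre ++ row[x] :: (List.range' (x + 1) cnt).map (fun x' => pvNewCell (row.getD x' "") (pvCnt grid y x'))
              = (rpre ++ [row[x]]) ++ (List.range' (x + 1) cnt).map (fun x' => pvNewCell (row.getD x' "") (pvCnt grid y x'))
            from by simp]
        exact ih (x + 1) (by omega) pre hpre (rpre ++ [row[x]]) (by simp [hrpre]) u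
    · rw [if_neg hL]
      by_cases hH : row[x] = "#"
      · rw [if_pos hH]
        by_cases h5 : 5 ≤ pvCnt grid y x
        · rw [if_pos ((pvCond_H grid y x row hy hrow hxlt).mpr h5)]
          have hval : pvNewCell (row.getD x "") (pvCnt grid y x) = "L" := by
            unfold pvNewCell; rw [hcellD]; simp [hH, h5]
          have hinc : pvIncr (row.getD x "") (pvCnt grid y x) = 1 := by
            unfold pvIncr; rw [hcellD]; simp [hH, h5]
          rw [hval, hinc, hmod "L", ← add_assoc,
            show rpre ++ "L" :: (List.range' (x + 1) cnt).map (fun x' => pvNewCell (row.getD x' "") (pvCnt grid y x'))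
                = (rpre ++ ["L"]) ++ (List.range' (x + 1) cnt).map (fun x' => pvNewCell (row.getD x' "") (pvCnt grid y x'))
              from by simp]
          exact ih (x + 1) (by omega) pre hpre (rpre ++ ["L"]) (by simp [hrpre]) (u + 1)
        · rw [if_neg (fun hc => h5 ((pvCond_H grid y x row hy hrow hxlt).mp hc))]
          have hval : pvNewCell (row.getD x "") (pvCnt grid y x) = row[x] := by
            unfold pvNewCell; rw [hcellD]; simp [hH, h5]
          have hinc : pvIncr (row.getD x "") (pvCnt grid y x) = 0 := by
            unfold pvIncr; rw [hcellD]; simp [hH, h5]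
          rw [hval, hinc, hcur, zero_add,
            show rpre ++ row[x] :: (List.range' (x + 1) cnt).map (fun x' => pvNewCell (row.getD x' "") (pvCnt grid y x'))
                = (rpre ++ [row[x]]) ++ (List.range' (x + 1) cnt).map (fun x' => pvNewCell (row.getD x' "") (pvCnt grid y x'))
              from by simp]
          exact ih (x + 1) (by omega) pre hpre (rpre ++ [row[x]]) (by simp [hrpre]) u
      · rw [if_neg hH]
        have hval : pvNewCell (row.getD x "") (pvCnt grid y x) = row[x] := by
          unfold pvNewCell; rw [hcellD]; simp [hL, hH]
        have hinc : pvIncr (row.getD x "") (pvCnt grid y x) = 0 := by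
          unfold pvIncr; rw [hcellD]; simp [hL, hH]
        rw [hval, hinc, hcur, zero_add,
          show rpre ++ row[x] :: (List.range' (x + 1) cnt).map (fun x' => pvNewCell (row.getD x' "") (pvCnt grid y x'))
              = (rpre ++ [row[x]]) ++ (List.range' (x + 1) cnt).map (fun x' => pvNewCell (row.getD x' "") (pvCnt grid y x'))
            from by simp]
        exact ih (x + 1) (by omega) pre hpre (rpre ++ [row[x]]) (by simp [hrpre]) u

-- A's outer loop over the rows
lemma pvA_outer (grid : List (List String)) :
    ∀ (cnt y : Nat), y + cnt = grid.length →
      ∀ (pre : List (List String)), pre.length = y → ∀ (u : Int),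
      (List.range' y cnt).foldl
        (fun (st : List (List String) × Int) (y : Nat) =>
          let row := grid.getD y []
          (List.range row.length).foldl
            (fun (st : List (List String) × Int) (x : Nat) =>
              let seats := get_directional_closet_seats grid (y : Int) (x : Int)
              let c := row.getD x ""
              if c = "L" then
                if seats.contains '#' = false then (st.1.modify y (fun r => r.set x "#"), st.2 + 1) else st
              else if c = "#" then
                if seats.contains '#' = true ∧ 5 ≤ seats.getD '#' 0 then (st.1.modify y (fun r => r.set x "L"), st.2 + 1)
                else st
              else st) st)
        (pre ++ grid.drop y, u)
      = (pre ++ (List.range' y cnt).map (pvSpecRow grid),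
         u + ((List.range' y cnt).map (pvRowIncr grid)).sum) := by
  intro cnt
  induction cnt with
  | zero =>
    intro y hcnt pre hpre u
    have : grid.drop y = [] := List.drop_eq_nil_of_le (by omega)
    simp [this]
  | succ cnt ih =>
    intro y hcnt pre hpre u
    have hylt : y < grid.length := by omega
    have hdropg : grid.drop y = ([] ++ (grid.getD y []).drop 0) :: grid.drop (y + 1) := by
      rw [List.drop_eq_getElem_cons hylt]
      simp [List.getD_eq_getElem?_getD, List.getElem?_eq_getElem hylt]
    rw [List.range'_succ]
    simp only [List.foldl_cons, List.map_cons, List.sum_cons]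
    rw [hdropg, List.range_eq_range',
      pvA_inner grid y (grid.getD y []) hylt rfl ((grid.getD y []).length) 0 (by omega) pre hpre [] rfl u]
    have hspec : [] ++ (List.range' 0 (grid.getD y []).length).map
          (fun x' => pvNewCell ((grid.getD y []).getD x' "") (pvCnt grid y x')) = pvSpecRow grid y := by
      simp [pvSpecRow, List.range_eq_range']
    have hsum : ((List.range' 0 (grid.getD y []).length).map
          (fun x' => pvIncr ((grid.getD y []).getD x' "") (pvCnt grid y x'))).sum = pvRowIncr grid y := by
      simp [pvRowIncr, List.range_eq_range']
    rw [hspec, hsum,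
      show pre ++ pvSpecRow grid y :: grid.drop (y + 1) = (pre ++ [pvSpecRow grid y]) ++ grid.drop (y + 1)
        from by simp,
      ih (y + 1) (by omega) (pre ++ [pvSpecRow grid y]) (by simp [hpre]) (u + pvRowIncr grid y)]
    simp [add_assoc]

-- A computes the common description
lemma pvA_eq (grid : List (List String)) : run_iteration grid = pvSpec grid := by
  unfold run_iteration pvSpec
  rw [show List.range grid.length = List.range' 0 grid.length from List.range_eq_range']
  have := pvA_outer grid grid.length 0 (by omega) [] rfl 0
  simpa using this

-- ---- B side: the sweeps compute the same walks ----

lemma pvSeat_eq (c : String) : pvSeat c = true ↔ (c = "L" ∨ c = "#") := by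
  simp [pvSeat]

def pvPrevVal (prev : List String) (x : Int) : String :=
  if 0 ≤ x ∧ x < (prev.length : Int) then prev.getD x.toNat "." else "."

lemma pvNextVis_length (row prev : List String) (dx : Int) : (pvNextVis row prev dx).length = row.length := by
  simp [pvNextVis]

lemma pvNextVis_getD (row prev : List String) (dx : Int) (x : Nat) (hx : x < row.length) :
    (pvNextVis row prev dx).getD x "" = pvPrevVal prev ((x : Int) + dx) := by
  unfold pvNextVis pvPrevVal
  exact PySem.List.getD_map_range _ _ _ _ hx

def pvSweepGo (dx : Int) : List (List String) → List String → List (List String)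
  | [], _ => []
  | r :: rs, prev =>
    let v := pvNextVis r prev dx
    v :: pvSweepGo dx rs (pvMerged r v)

lemma pvSweep_go_aux (dx : Int) :
    ∀ (rows : List (List String)) (acc : List (List String)) (prev : List String),
      (rows.foldl (fun (acc : List (List String) × List String) row =>
          let v := pvNextVis row acc.2 dx
          (acc.1 ++ [v], pvMerged row v)) (acc, prev)).1
        = acc ++ pvSweepGo dx rows prev := by
  intro rows
  induction rows with
  | nil => intro acc prev; simp [pvSweepGo]
  | cons r rs ih =>
    intro acc prev
    simp only [List.foldl_cons, pvSweepGo]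
    rw [ih]
    simp

lemma pvSweep_eq_go (rows : List (List String)) (dx : Int) :
    pvSweep rows dx = pvSweepGo dx rows [] := by
  unfold pvSweep
  rw [pvSweep_go_aux]
  simp

lemma pvSweepGo_length (dx : Int) :
    ∀ (rows : List (List String)) (prev : List String), (pvSweepGo dx rows prev).length = rows.length := by
  intro rows
  induction rows with
  | nil => intro prev; rfl
  | cons r rs ih => intro prev; simp [pvSweepGo, ih]

lemma pvMerged_prevVal (r prev : List String) (dx : Int) (C : List (List String))
    (hprev : ∀ z : Int, pvPrevVal prev z = pvRayWalk dx C z) :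
    ∀ z : Int, pvPrevVal (pvMerged r (pvNextVis r prev dx)) z = pvRayWalk dx (r :: C) z := by
  intro z
  have hlen : (pvMerged r (pvNextVis r prev dx)).length = r.length := by
    simp [pvMerged, pvNextVis_length]
  unfold pvPrevVal
  by_cases hz : 0 ≤ z ∧ z < (r.length : Int)
  · have hzn : z.toNat < r.length := by omega
    rw [if_pos (by rw [hlen]; exact hz)]
    have hvlen : z.toNat < (pvNextVis r prev dx).length := by rw [pvNextVis_length]; exact hzn
    have hmlen : z.toNat < (pvMerged r (pvNextVis r prev dx)).length := by rw [hlen]; exact hzn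
    have hget : (pvMerged r (pvNextVis r prev dx)).getD z.toNat "."
        = if pvSeat r[z.toNat] then r[z.toNat] else (pvNextVis r prev dx)[z.toNat] := by
      rw [List.getD_eq_getElem _ _ hmlen]
      unfold pvMerged
      rw [List.getElem_map, List.getElem_zip]
    rw [hget]
    have hv : (pvNextVis r prev dx)[z.toNat] = pvPrevVal prev ((z.toNat : Int) + dx) := by
      rw [← List.getD_eq_getElem _ "" hvlen]
      exact pvNextVis_getD r prev dx z.toNat hzn
    have hzz : ((z.toNat : Int)) = z := Int.toNat_of_nonneg hz.1
    rw [hv, hzz, hprev]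
    show _ = pvRayWalk dx (r :: C) z
    simp only [pvRayWalk]
    rw [if_pos hz]
    have hc : r.getD z.toNat "" = r[z.toNat] := List.getD_eq_getElem r "" hzn
    rw [hc]
    by_cases hseat : r[z.toNat] = "L" ∨ r[z.toNat] = "#"
    · rw [if_pos ((pvSeat_eq _).mpr hseat), if_pos hseat]
    · rw [if_neg (fun hb => hseat ((pvSeat_eq _).mp hb)), if_neg hseat]
  · rw [if_neg (by rw [hlen]; exact hz)]
    show _ = pvRayWalk dx (r :: C) z
    simp only [pvRayWalk]
    rw [if_neg hz]

lemma pvPrevVal_nil (dx : Int) : ∀ z : Int, pvPrevVal [] z = pvRayWalk dx [] z := by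
  intro z
  unfold pvPrevVal
  simp [pvRayWalk]

lemma pvSweepGo_spec (dx : Int) :
    ∀ (rows : List (List String)) (prev : List String) (C : List (List String)),
      (∀ z : Int, pvPrevVal prev z = pvRayWalk dx C z) →
      ∀ (y : Nat) (hy : y < rows.length) (x : Nat), x < rows[y].length →
        ((pvSweepGo dx rows prev).getD y []).getD x ""
          = pvRayWalk dx ((rows.take y).reverse ++ C) ((x : Int) + dx) := by
  intro rows
  induction rows with
  | nil =>
    intro prev C hprev y hy
    simp at hy
  | cons r rs ih =>
    intro prev C hprev y hy x hx
    cases y with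
    | zero =>
      show (pvNextVis r prev dx).getD x "" = _
      rw [pvNextVis_getD r prev dx x (by simpa using hx), hprev]
      simp
    | succ y =>
      show ((pvSweepGo dx rs (pvMerged r (pvNextVis r prev dx))).getD y []).getD x "" = _
      rw [ih (pvMerged r (pvNextVis r prev dx)) (r :: C)
            (pvMerged_prevVal r prev dx C hprev) y (by simpa using hy) x (by simpa using hx)]
      rw [List.take_succ_cons]
      simp

-- the eight table lookups
lemma pvSweep_length (rows : List (List String)) (dx : Int) : (pvSweep rows dx).length = rows.length := by
  rw [pvSweep_eq_go]; exact pvSweepGo_length dx rows []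

lemma pvTab_up (grid : List (List String)) (dxv : Int) (y x : Nat)
    (hy : y < grid.length) (hx : x < (grid.getD y []).length) :
    (((pvSweep grid dxv).getD y []).getD x "") = pvRayWalk dxv ((grid.take y).reverse) ((x : Int) + dxv) := by
  rw [pvSweep_eq_go]
  have hx' : x < grid[y].length := by rwa [List.getD_eq_getElem grid [] hy] at hx
  rw [pvSweepGo_spec dxv grid [] [] (pvPrevVal_nil dxv) y hy x hx']
  simp

lemma pvGetDRev {α : Type} (l : List α) (i : Nat) (d : α) (h : i < l.length) :
    l.reverse.getD i d = l.getD (l.length - 1 - i) d := by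
  rw [List.getD_eq_getElem?_getD, List.getD_eq_getElem?_getD, List.getElem?_reverse h]

lemma pvTab_down (grid : List (List String)) (dxv : Int) (y x : Nat)
    (hy : y < grid.length) (hx : x < (grid.getD y []).length) :
    ((((pvSweep grid.reverse dxv).reverse).getD y []).getD x "")
      = pvRayWalk dxv (grid.drop (y + 1)) ((x : Int) + dxv) := by
  have hswlen : (pvSweep grid.reverse dxv).length = grid.length := by
    rw [pvSweep_length, List.length_reverse]
  rw [pvGetDRev _ y [] (by rw [hswlen]; exact hy), hswlen]
  rw [pvSweep_eq_go]
  have hklt : grid.length - 1 - y < grid.reverse.length := by rw [List.length_reverse]; omega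
  have hgk : grid.reverse[grid.length - 1 - y] = grid[y] := by
    rw [List.getElem_reverse]
    congr 1
    omega
  rw [pvSweepGo_spec dxv grid.reverse [] [] (pvPrevVal_nil dxv) (grid.length - 1 - y) hklt x
      (by rw [hgk, ← List.getD_eq_getElem grid [] hy]; exact hx)]
  rw [List.append_nil, List.take_reverse, List.reverse_reverse]
  have hidx : grid.length - (grid.length - 1 - y) = y + 1 := by omega
  rw [hidx]

def pvVisFrom (v : String) : List String → List String
  | [] => []
  | c :: cs => v :: pvVisFrom (if pvSeat c then c else v) cs

lemma pvLineVis_aux :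
    ∀ (row : List String) (acc : List String) (v : String),
      (row.foldl (fun (acc : List String × String) c =>
          (acc.1 ++ [acc.2], if pvSeat c then c else acc.2)) (acc, v)).1
        = acc ++ pvVisFrom v row := by
  intro row
  induction row with
  | nil => intro acc v; simp [pvVisFrom]
  | cons c cs ih =>
    intro acc v
    simp only [List.foldl_cons, pvVisFrom]
    rw [ih]
    simp

lemma pvLineVis_eq (row : List String) : pvLineVis row = pvVisFrom "." row := by
  unfold pvLineVis
  rw [pvLineVis_aux]
  simp

lemma pvVisFrom_length : ∀ (row : List String) (v : String), (pvVisFrom v row).length = row.length := by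
  intro row
  induction row with
  | nil => intro v; rfl
  | cons c cs ih => intro v; simp [pvVisFrom, ih]

lemma pvHWalkD_append (L : List String) (c : String) (v : String) :
    pvHWalkD v (L ++ [c]) = pvHWalkD (if pvSeat c then c else v) L := by
  induction L with
  | nil =>
    show pvHWalkD v [c] = _
    simp only [pvHWalkD]
    by_cases hseat : c = "L" ∨ c = "#"
    · rw [if_pos hseat, if_pos ((pvSeat_eq _).mpr hseat)]
    · rw [if_neg hseat, if_neg (fun hb => hseat ((pvSeat_eq _).mp hb))]
  | cons d ds ih =>
    show pvHWalkD v (d :: (ds ++ [c])) = _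
    simp only [pvHWalkD]
    rw [ih]

lemma pvVisFrom_getD :
    ∀ (row : List String) (v : String) (x : Nat), x < row.length →
      (pvVisFrom v row).getD x "" = pvHWalkD v ((row.take x).reverse) := by
  intro row
  induction row with
  | nil => intro v x hx; simp at hx
  | cons c cs ih =>
    intro v x hx
    cases x with
    | zero => simp [pvVisFrom, pvHWalkD]
    | succ x =>
      show (pvVisFrom (if pvSeat c then c else v) cs).getD x "" = _
      rw [ih (if pvSeat c then c else v) x (by simpa using hx)]
      rw [List.take_succ_cons, List.reverse_cons, pvHWalkD_append]

lemma pvTab_left (grid : List (List String)) (y x : Nat)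
    (hy : y < grid.length) (hx : x < (grid.getD y []).length) :
    (((grid.map pvLineVis).getD y []).getD x "")
      = pvHWalkD "." (((grid.getD y []).take x).reverse) := by
  have hmlen : y < (grid.map pvLineVis).length := by simpa using hy
  rw [List.getD_eq_getElem _ [] hmlen, List.getElem_map,
      List.getD_eq_getElem grid [] hy, pvLineVis_eq,
      pvVisFrom_getD grid[y] "." x (by rwa [List.getD_eq_getElem grid [] hy] at hx)]

lemma pvTab_right (grid : List (List String)) (y x : Nat)
    (hy : y < grid.length) (hx : x < (grid.getD y []).length) :
    (((grid.map (fun row => (pvLineVis row.reverse).reverse)).getD y []).getD x "")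
      = pvHWalkD "." ((grid.getD y []).drop (x + 1)) := by
  have hmlen : y < (grid.map (fun row => (pvLineVis row.reverse).reverse)).length := by simpa using hy
  rw [List.getD_eq_getElem _ [] hmlen, List.getElem_map,
      List.getD_eq_getElem grid [] hy]
  have hx' : x < grid[y].length := by rwa [List.getD_eq_getElem grid [] hy] at hx
  have hlv : (pvLineVis grid[y].reverse).length = grid[y].length := by
    rw [pvLineVis_eq, pvVisFrom_length, List.length_reverse]
  rw [pvGetDRev _ x "" (by rw [hlv]; exact hx'), hlv, pvLineVis_eq,
      pvVisFrom_getD grid[y].reverse "." (grid[y].length - 1 - x)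
        (by rw [List.length_reverse]; omega)]
  rw [List.take_reverse, List.reverse_reverse]
  have hidx : grid[y].length - (grid[y].length - 1 - x) = x + 1 := by omega
  rw [hidx]

-- per-cell '#'-count of B equals the common count
lemma pvK_eq (grid : List (List String)) (y x : Nat)
    (hy : y < grid.length) (hx : x < (grid.getD y []).length) :
    (([pvSweep grid (-1), (pvSweep grid.reverse (-1)).reverse,
       pvSweep grid 0, (pvSweep grid.reverse 0).reverse,
       pvSweep grid 1, (pvSweep grid.reverse 1).reverse,
       grid.map pvLineVis,
       grid.map (fun row => (pvLineVis row.reverse).reverse)]).map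
        (fun t => if (t.getD y []).getD x "" = "#" then (1 : Int) else 0)).sum
      = pvCnt grid y x := by
  simp only [List.map_cons, List.map_nil, List.sum_cons, List.sum_nil]
  rw [pvTab_up grid (-1) y x hy hx, pvTab_down grid (-1) y x hy hx,
      pvTab_up grid 0 y x hy hx, pvTab_down grid 0 y x hy hx,
      pvTab_up grid 1 y x hy hx, pvTab_down grid 1 y x hy hx,
      pvTab_left grid y x hy hx, pvTab_right grid y x hy hx]
  unfold pvCnt pvInd
  ring

-- B's inner loop (abstract per-column count k)
lemma pvB_inner (k : Int → Int) :
    ∀ (cells : List String) (s : Int) (acc : List String) (u : Int),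
      (PySem.List.enumerate cells s).foldl
        (fun (st2 : List String × Int) (xc : Int × String) =>
          if xc.2 = "L" ∧ k xc.1 = 0 then (st2.1 ++ ["#"], st2.2 + 1)
          else if xc.2 = "#" ∧ 5 ≤ k xc.1 then (st2.1 ++ ["L"], st2.2 + 1)
          else (st2.1 ++ [xc.2], st2.2)) (acc, u)
      = (acc ++ (List.range cells.length).map (fun j => pvNewCell (cells.getD j "") (k (s + j))),
         u + ((List.range cells.length).map (fun j => pvIncr (cells.getD j "") (k (s + j)))).sum) := by
  intro cells
  induction cells with
  | nil => intro s acc u; simp [PySem.List.enumerate_nil]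
  | cons c cs ih =>
    intro s acc u
    rw [PySem.List.enumerate_cons, List.foldl_cons]
    simp only []
    have hstep : (if c = "L" ∧ k s = 0 then (acc ++ ["#"], u + 1)
        else if c = "#" ∧ 5 ≤ k s then (acc ++ ["L"], u + 1)
        else (acc ++ [c], u))
        = (acc ++ [pvNewCell c (k s)], u + pvIncr c (k s)) := by
      unfold pvNewCell pvIncr
      split_ifs <;> simp
    rw [hstep, ih (s + 1) (acc ++ [pvNewCell c (k s)]) (u + pvIncr c (k s))]
    simp only [List.length_cons]
    rw [List.range_succ_eq_map]
    simp only [List.map_cons, List.map_map, List.sum_cons, List.getD_cons_zero,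
      Nat.cast_zero, add_zero, Function.comp_def, Nat.succ_eq_add_one]
    have hN : (List.range cs.length).map (fun j => pvNewCell ((c :: cs).getD (j + 1) "") (k (s + ((j : Nat) + 1 : Nat))))
        = (List.range cs.length).map (fun j => pvNewCell (cs.getD j "") (k (s + 1 + (j : Nat)))) := by
      refine List.map_congr_left (fun j _ => ?_)
      rw [List.getD_cons_succ]
      have : s + ((j : Nat) + 1 : Nat) = s + 1 + (j : Nat) := by push_cast; ring
      rw [this]
    have hI : (List.range cs.length).map (fun j => pvIncr ((c :: cs).getD (j + 1) "") (k (s + ((j : Nat) + 1 : Nat))))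
        = (List.range cs.length).map (fun j => pvIncr (cs.getD j "") (k (s + 1 + (j : Nat)))) := by
      refine List.map_congr_left (fun j _ => ?_)
      rw [List.getD_cons_succ]
      have : s + ((j : Nat) + 1 : Nat) = s + 1 + (j : Nat) := by push_cast; ring
      rw [this]
    rw [hN, hI]
    simp [add_assoc]

-- B's outer loop (abstract per-cell count K)
lemma pvB_outer (K : Int → Int → Int) :
    ∀ (rows : List (List String)) (s : Int) (acc : List (List String)) (u : Int),
      (PySem.List.enumerate rows s).foldl
        (fun (st : List (List String) × Int) (yrow : Int × List String) =>
          let res := (PySem.List.enumerate yrow.2 0).foldl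
            (fun (st2 : List String × Int) (xc : Int × String) =>
              if xc.2 = "L" ∧ K yrow.1 xc.1 = 0 then (st2.1 ++ ["#"], st2.2 + 1)
              else if xc.2 = "#" ∧ 5 ≤ K yrow.1 xc.1 then (st2.1 ++ ["L"], st2.2 + 1)
              else (st2.1 ++ [xc.2], st2.2)) ([], st.2)
          (st.1 ++ [res.1], res.2)) (acc, u)
      = (acc ++ (List.range rows.length).map (fun i =>
            (List.range (rows.getD i []).length).map (fun j =>
              pvNewCell ((rows.getD i []).getD j "") (K (s + i) j))),
         u + ((List.range rows.length).map (fun i =>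
            ((List.range (rows.getD i []).length).map (fun j =>
              pvIncr ((rows.getD i []).getD j "") (K (s + i) j))).sum)).sum) := by
  intro rows
  induction rows with
  | nil => intro s acc u; simp [PySem.List.enumerate_nil]
  | cons r rs ih =>
    intro s acc u
    rw [PySem.List.enumerate_cons, List.foldl_cons]
    simp only []
    rw [pvB_inner (fun xi => K s xi) r 0 [] u]
    simp only []
    rw [ih (s + 1)]
    simp only [List.length_cons]
    rw [List.range_succ_eq_map]
    simp only [List.map_cons, List.map_map, List.sum_cons, List.getD_cons_zero,
      Nat.cast_zero, add_zero, Function.comp_def, Nat.succ_eq_add_one, List.nil_append, zero_add]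
    have hN : (List.range rs.length).map (fun i =>
          (List.range ((r :: rs).getD (i + 1) []).length).map (fun j =>
            pvNewCell (((r :: rs).getD (i + 1) []).getD j "") (K (s + ((i : Nat) + 1 : Nat)) j)))
        = (List.range rs.length).map (fun i =>
          (List.range (rs.getD i []).length).map (fun j =>
            pvNewCell ((rs.getD i []).getD j "") (K (s + 1 + (i : Nat)) j))) := by
      refine List.map_congr_left (fun i _ => ?_)
      rw [List.getD_cons_succ]
      have : s + ((i : Nat) + 1 : Nat) = s + 1 + (i : Nat) := by push_cast; ring
      rw [this]
    have hI : (List.range rs.length).map (fun i =>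
          ((List.range ((r :: rs).getD (i + 1) []).length).map (fun j =>
            pvIncr (((r :: rs).getD (i + 1) []).getD j "") (K (s + ((i : Nat) + 1 : Nat)) j))).sum)
        = (List.range rs.length).map (fun i =>
          ((List.range (rs.getD i []).length).map (fun j =>
            pvIncr ((rs.getD i []).getD j "") (K (s + 1 + (i : Nat)) j))).sum) := by
      refine List.map_congr_left (fun i _ => ?_)
      rw [List.getD_cons_succ]
      have : s + ((i : Nat) + 1 : Nat) = s + 1 + (i : Nat) := by push_cast; ring
      rw [this]
    rw [hN, hI]
    simp [add_assoc]

-- B computes the common description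
lemma pvB_eq (grid : List (List String)) : run_iteration_alt grid = pvSpec grid := by
  unfold run_iteration_alt
  rw [pvB_outer (fun yi xi =>
      (([pvSweep grid (-1), (pvSweep grid.reverse (-1)).reverse,
         pvSweep grid 0, (pvSweep grid.reverse 0).reverse,
         pvSweep grid 1, (pvSweep grid.reverse 1).reverse,
         grid.map pvLineVis,
         grid.map (fun row => (pvLineVis row.reverse).reverse)]).map
          (fun t => if (t.getD yi.toNat []).getD xi.toNat "" = "#" then (1 : Int) else 0)).sum)
    grid 0 [] 0]
  unfold pvSpec pvSpecRow pvRowIncr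
  simp only [List.nil_append, zero_add]
  congr 1
  · refine List.map_congr_left (fun i hi => ?_)
    have hiN : i < grid.length := List.mem_range.mp hi
    refine List.map_congr_left (fun j hj => ?_)
    have hjN : j < (grid.getD i []).length := List.mem_range.mp hj
    congr 1
    simp only [Int.toNat_natCast]
    exact pvK_eq grid i j hiN hjN
  · congr 1
    refine List.map_congr_left (fun i hi => ?_)
    have hiN : i < grid.length := List.mem_range.mp hi
    congr 1
    refine List.map_congr_left (fun j hj => ?_)
    have hjN : j < (grid.getD i []).length := List.mem_range.mp hj
    congr 1
    simp only [Int.toNat_natCast]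
    exact pvK_eq grid i j hiN hjN

-- ===== VERDICT (by name: the statement is the Claim_ definition above) =====
theorem run_iteration_spec : Claim_equal_run_iteration := by
  intro grid _
  unfold Spec_run_iteration
  rw [pvA_eq, pvB_eq]
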